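-- pv_equiv track=rewrite | github.com/AcroMace/whistlesheet | whistlesheet.py | convert_octave_to_lilypond
-- ===== SOURCE A (Python) =====
-- def convert_octave_to_lilypond(octave):
-- 	quotes_and_commas = ''
-- 	while octave != 4:
-- 		if octave > 4:
-- 			quotes_and_commas += "'"
-- 			octave -= 1
-- 		else:
-- 			quotes_and_commas += ","
-- 			octave += 1
-- 	return quotes_and_commas
-- ===== SOURCE B (Python) =====
-- def convert_octave_to_lilypond(octave):
-- 	return "'" * (octave - 4) if octave >= 4 else "," * (4 - octave)
-- ===== Notes on version B (the rewrite author's own statement) =====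
-- stated objective: simpler
-- what changed: Replaces the character-by-character accumulation while-loop with a closed-form string repetition computed directly from the distance to the reference octave.
import Mathlib
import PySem

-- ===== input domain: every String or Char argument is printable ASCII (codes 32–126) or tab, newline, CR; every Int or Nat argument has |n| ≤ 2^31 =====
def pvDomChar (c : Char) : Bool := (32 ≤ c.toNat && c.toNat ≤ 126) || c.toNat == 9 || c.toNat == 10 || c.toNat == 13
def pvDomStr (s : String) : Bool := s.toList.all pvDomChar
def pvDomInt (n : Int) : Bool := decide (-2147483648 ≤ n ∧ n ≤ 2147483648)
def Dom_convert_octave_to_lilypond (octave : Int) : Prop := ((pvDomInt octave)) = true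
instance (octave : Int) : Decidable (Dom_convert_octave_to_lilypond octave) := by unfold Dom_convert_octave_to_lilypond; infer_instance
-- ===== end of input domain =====

-- B replaces A's one-character-per-iteration while loop with a closed-form string repetition (simpler).


-- ===== PORT A =====
-- A's while loop: accumulate one quote/comma per step until octave reaches 4.
def convert_octave_to_lilypond_loop (quotes_and_commas : String) (octave : Int) : String :=
  if octave ≠ 4 then
    if octave > 4 then
      convert_octave_to_lilypond_loop (quotes_and_commas ++ "'") (octave - 1)
    else
      convert_octave_to_lilypond_loop (quotes_and_commas ++ ",") (octave + 1)
  else quotes_and_commas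
termination_by (octave - 4).natAbs
decreasing_by all_goals omega

def convert_octave_to_lilypond (octave : Int) : String :=
  convert_octave_to_lilypond_loop "" octave

-- ===== PORT B =====
-- Source B: "'" * (octave - 4) if octave >= 4 else "," * (4 - octave)
def convert_octave_to_lilypond_alt (octave : Int) : String :=
  if octave ≥ 4 then String.ofList (List.replicate (octave - 4).toNat '\'')
  else String.ofList (List.replicate (4 - octave).toNat ',')

-- ===== PRECONDITION & SPEC =====
def Spec_convert_octave_to_lilypond (octave : Int) (out : String) : Prop := out = convert_octave_to_lilypond_alt octave
instance (octave : Int) (out : String) : Decidable (Spec_convert_octave_to_lilypond octave out) := by unfold Spec_convert_octave_to_lilypond; infer_instance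

-- ===== CLAIM (what is proved, stated in full; the proofs are below) =====
def Claim_equal_convert_octave_to_lilypond : Prop := ∀ (octave : Int), Dom_convert_octave_to_lilypond octave → Spec_convert_octave_to_lilypond octave (convert_octave_to_lilypond octave)

-- ===== LEMMAS AND PROOFS =====

-- singleton strings as ofList (for regrouping appends)
theorem quote_eq : "'" = String.ofList ['\''] := by decide
theorem comma_eq : "," = String.ofList [','] := by decide

theorem append_ofList_cons (s : String) (c : Char) (l : List Char) :
    s ++ String.ofList [c] ++ String.ofList l = s ++ String.ofList (c :: l) := by
  rw [String.append_assoc, ← String.ofList_append]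
  rfl

-- the loop prepends its accumulator to the closed-form result
theorem loop_eq_alt (acc : String) (octave : Int) :
    convert_octave_to_lilypond_loop acc octave = acc ++ convert_octave_to_lilypond_alt octave := by
  induction acc, octave using convert_octave_to_lilypond_loop.induct with
  | case1 acc octave hne hgt ih =>
    rw [convert_octave_to_lilypond_loop, if_pos hne, if_pos hgt, ih]
    simp only [convert_octave_to_lilypond_alt, if_pos (by omega : octave - 1 ≥ 4),
      if_pos (by omega : octave ≥ 4)]
    have h : (octave - 4).toNat = (octave - 1 - 4).toNat + 1 := by omega
    rw [h, List.replicate_succ, quote_eq, append_ofList_cons]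
  | case2 acc octave hne hle ih =>
    rw [convert_octave_to_lilypond_loop, if_pos hne, if_neg hle, ih]
    simp only [convert_octave_to_lilypond_alt, if_neg (by omega : ¬ octave ≥ 4)]
    by_cases h : octave + 1 ≥ 4
    · have h1 : octave = 3 := by omega
      subst h1
      rw [if_pos h]
      show acc ++ "," ++ String.ofList [] = acc ++ String.ofList [',']
      rw [comma_eq, append_ofList_cons]
    · rw [if_neg h]
      have h2 : (4 - octave).toNat = (4 - (octave + 1)).toNat + 1 := by omega
      rw [h2, List.replicate_succ, comma_eq, append_ofList_cons]
  | case3 acc octave hne =>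
    have h4 : octave = 4 := by omega
    subst h4
    rw [convert_octave_to_lilypond_loop]
    simp [convert_octave_to_lilypond_alt]

-- ===== VERDICT (by name: the statement is the Claim_ definition above) =====
theorem convert_octave_to_lilypond_spec : Claim_equal_convert_octave_to_lilypond := by
  intro octave _
  unfold Spec_convert_octave_to_lilypond convert_octave_to_lilypond
  rw [loop_eq_alt]
  simp
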